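-- pv_equiv track=rewrite | github.com/cresqnt-sys/FishScope-Macro | main.py | correct_name
-- ===== SOURCE A (Python) =====
-- from itertools import product
--
-- def generate_ao_variants(name):
--     ambiguous_positions = [i for i, c in enumerate(name.lower()) if c in ('a', 'o')]
--     variants = []
--     options = [('a', 'o')] * len(ambiguous_positions)
--     for combo in product(*options):
--         name_list = list(name.lower())
--         for pos, char in zip(ambiguous_positions, combo):
--             name_list[pos] = char
--         variant = ''.join(name_list)
--         variants.append(variant.title())
--     return variants
--
-- def correct_name(raw_name, known_names, max_distance=2):
--     raw_name = raw_name.title()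
--
--     for variant in generate_ao_variants(raw_name):
--         if variant in known_names:
--             return variant
--
--     best_match = None
--     best_distance = max_distance + 1
--     for name in known_names:
--         dist = levenshtein(raw_name.lower(), name.lower())
--         if dist < best_distance:
--             best_distance = dist
--             best_match = name
--
--     return best_match if best_distance <= max_distance else raw_name
--
-- def levenshtein(s1, s2):
--     if len(s1) < len(s2):
--         return levenshtein(s2, s1)
--
--     if len(s2) == 0:
--         return len(s1)
--
--     previous_row = list(range(len(s2) + 1))
--     for i, c1 in enumerate(s1):
--         current_row = [i + 1]
--         for j, c2 in enumerate(s2):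
--             insertions = previous_row[j + 1] + 1
--             deletions = current_row[j] + 1
--             substitutions = previous_row[j] + (c1 != c2)
--             current_row.append(min(insertions, deletions, substitutions))
--         previous_row = current_row
--
--     return previous_row[-1]
-- ===== SOURCE B (Python) =====
-- def levenshtein(s1, s2):
--     if len(s1) < len(s2):
--         return levenshtein(s2, s1)
--
--     if len(s2) == 0:
--         return len(s1)
--
--     previous_row = list(range(len(s2) + 1))
--     for i, c1 in enumerate(s1):
--         current_row = [i + 1]
--         for j, c2 in enumerate(s2):
--             insertions = previous_row[j + 1] + 1
--             deletions = current_row[j] + 1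
--             substitutions = previous_row[j] + (c1 != c2)
--             current_row.append(min(insertions, deletions, substitutions))
--         previous_row = current_row
--
--     return previous_row[-1]
--
--
-- def _ao_key(name, rlow):
--     """If `name` is an a/o-variant of the titled template, return the list of its
--     a/o choices at the ambiguous positions (the product-order rank); else None."""
--     if len(name) != len(rlow) or name != name.title():
--         return None
--     key = []
--     for c, d in zip(name.lower(), rlow):
--         if d in ('a', 'o'):
--             if c not in ('a', 'o'):
--                 return None
--             key.append(c)
--         elif c != d:
--             return None
--     return key
--
--
-- def correct_name(raw_name, known_names, max_distance=2):
--     r = raw_name.title()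
--     rlow = r.lower()
--
--     best_key = None
--     best_name = None
--     for n in known_names:
--         k = _ao_key(n, rlow)
--         if k is not None and (best_key is None or k < best_key):
--             best_key, best_name = k, n
--     if best_name is not None:
--         return best_name
--
--     if known_names:
--         best = min(known_names, key=lambda n: levenshtein(rlow, n.lower()))
--         if levenshtein(rlow, best.lower()) <= max_distance:
--             return best
--     return r
-- ===== Notes on version B (the rewrite author's own statement) =====
-- stated objective: alternative
-- what changed: B scans known_names once, testing each name directly as an a/o-substitution of the titled input (collecting its a/o-choice vector and keeping the product-order-least match) instead of enumerating all 2^k a/o variants and probing membership; the fallback picks the edit-distance minimizer with min(key=...) instead of a sentinel-threshold scan.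
import Mathlib
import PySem

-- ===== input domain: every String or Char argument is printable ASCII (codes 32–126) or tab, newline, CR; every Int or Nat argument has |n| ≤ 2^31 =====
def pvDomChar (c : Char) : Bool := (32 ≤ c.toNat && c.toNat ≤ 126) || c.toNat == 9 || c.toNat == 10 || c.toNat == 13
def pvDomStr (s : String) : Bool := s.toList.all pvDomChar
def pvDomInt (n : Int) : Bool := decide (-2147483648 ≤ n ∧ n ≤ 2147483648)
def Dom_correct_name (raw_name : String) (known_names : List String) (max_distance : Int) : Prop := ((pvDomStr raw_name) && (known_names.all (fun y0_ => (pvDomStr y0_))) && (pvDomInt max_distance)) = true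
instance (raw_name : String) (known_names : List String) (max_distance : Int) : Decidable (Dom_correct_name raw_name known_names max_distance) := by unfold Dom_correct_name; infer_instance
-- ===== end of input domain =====

-- B replaces A's enumeration of all 2^k a/o-variants by a single scan of known_names
-- that tests each name directly as an a/o-substitution (objective: alternative).


-- ===== PORT A =====
-- Shared helper (both Source A and Source B call str.title()): Python's str.title(), exact on the
-- ASCII domain, where Python's "cased" coincides with A-Z/a-z; the Bool carry is
-- "previous character was cased".
def pyTitle : Bool → List Char → List Char
  | _, [] => []
  | prev, c :: cs =>
      (if PySem.Chars.isalpha c then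
        (if prev then PySem.Chars.lowerChar c else PySem.Chars.upperChar c)
       else c) :: pyTitle (PySem.Chars.isalpha c) cs

-- Shared helper: the module-level `levenshtein` (identical source in Source A and Source B).
-- The single self-call `if len(s1) < len(s2): return levenshtein(s2, s1)` is unrolled into
-- a wrapper: the swapped call re-enters with a false guard, so this is the same computation.
def levRows (s1 s2 : List Char) : Int :=
  if s2.length = 0 then (s1.length : Int)
  else
    let init := (List.range (s2.length + 1)).map (fun k => (k : Int))
    let lastRow := (PySem.List.enumerate s1).foldl
      (fun prev ic =>
        (PySem.List.enumerate s2).foldl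
          (fun cur jc =>
            let ins := PySem.List.pyGetD prev (jc.1 + 1) 0 + 1
            let del := PySem.List.pyGetD cur jc.1 0 + 1
            let sub := PySem.List.pyGetD prev jc.1 0 + (if ic.2 ≠ jc.2 then (1 : Int) else 0)
            cur ++ [min (min ins del) sub])
          [ic.1 + 1])
      init
    PySem.List.pyGetD lastRow (-1) 0   -- previous_row[-1]; the row is always nonempty

def levenshtein (s1 s2 : List Char) : Int :=
  if s1.length < s2.length then levRows s2 s1 else levRows s1 s2

-- itertools.product(*[('a','o')] * k): all k-tuples, leftmost position varying slowest
def prodAO : Nat → List (List Char)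
  | 0 => [[]]
  | k + 1 => (prodAO k).map ('a' :: ·) ++ (prodAO k).map ('o' :: ·)

-- [i for i, c in enumerate(lowered) if c in ('a', 'o')]
def aoPositions (low : List Char) : List Int :=
  ((PySem.List.enumerate low).filter (fun p => p.2 == 'a' || p.2 == 'o')).map (·.1)

def generate_ao_variants (name : List Char) : List (List Char) :=
  let amb := aoPositions (PySem.Chars.lower name)
  (prodAO amb.length).map (fun combo =>
    pyTitle false
      ((amb.zip combo).foldl (fun t pc => PySem.List.pySetD t pc.1 pc.2)
        (PySem.Chars.lower name)))

def correct_name (raw_name : String) (known_names : List String) (max_distance : Int) : String :=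
  let r := pyTitle false raw_name.toList
  match (generate_ao_variants r).find? (fun v => known_names.contains (String.ofList v)) with
  | some v => String.ofList v
  | none =>
    let res := known_names.foldl (fun acc n =>
        let dist := levenshtein (PySem.Chars.lower r) (PySem.Chars.lower n.toList)
        if dist < acc.1 then (dist, some n) else acc)
      (max_distance + 1, (none : Option String))
    -- best_match is always `some` when best_distance ≤ max_distance; the getD default is unreachable
    if res.1 ≤ max_distance then res.2.getD (String.ofList r) else String.ofList r

-- ===== PORT B =====
-- _ao_key(name, rlow): the a/o-choice vector of `name` at the ambiguous positions, or none
def aoKeyGo : List Char → List Char → Option (List Char)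
  | [], [] => some []
  | c :: cs, d :: ds =>
      if d == 'a' || d == 'o' then
        if c == 'a' || c == 'o' then (aoKeyGo cs ds).map (c :: ·) else none
      else if c == d then aoKeyGo cs ds else none
  | _, _ => none   -- length mismatch (unreachable after the length check)

def aoKey (n rlow : List Char) : Option (List Char) :=
  if n.length ≠ rlow.length ∨ n ≠ pyTitle false n then none
  else aoKeyGo (PySem.Chars.lower n) rlow

-- Python's `<` on lists of one-character strings
def lexLt : List Char → List Char → Bool
  | _, [] => false
  | [], _ :: _ => true
  | a :: as, b :: bs => if a < b then true else if a == b then lexLt as bs else false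

def correct_name_alt (raw_name : String) (known_names : List String) (max_distance : Int) : String :=
  let r := pyTitle false raw_name.toList
  let rlow := PySem.Chars.lower r
  let best := known_names.foldl (fun acc n =>
      match aoKey n.toList rlow with
      | none => acc
      | some k =>
        match acc.1 with
        | none => (some k, some n)
        | some bk => if lexLt k bk then (some k, some n) else acc)
    ((none : Option (List Char)), (none : Option String))
  match best.2 with
  | some n => n
  | none =>
    -- min(known_names, key=...) (first minimum) is PySem.List.min?; none ⟺ the list is empty
    match PySem.List.min? known_names
        (fun n => levenshtein rlow (PySem.Chars.lower n.toList)) with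
    | some m =>
        if levenshtein rlow (PySem.Chars.lower m.toList) ≤ max_distance then m
        else String.ofList r
    | none => String.ofList r

-- ===== PRECONDITION & SPEC =====
def Spec_correct_name (raw_name : String) (known_names : List String) (max_distance : Int) (out : String) : Prop := out = correct_name_alt raw_name known_names max_distance
instance (raw_name : String) (known_names : List String) (max_distance : Int) (out : String) : Decidable (Spec_correct_name raw_name known_names max_distance out) := by unfold Spec_correct_name; infer_instance

-- ===== CLAIM (what is proved, stated in full; the proofs are below) =====
def Claim_equal_correct_name : Prop := ∀ (raw_name : String) (known_names : List String) (max_distance : Int), Dom_correct_name raw_name known_names max_distance → Spec_correct_name raw_name known_names max_distance (correct_name raw_name known_names max_distance)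

-- ===== LEMMAS AND PROOFS =====

theorem chNat_inj {a b : Char} (h : a.toNat = b.toNat) : a = b :=
  Char.ext (UInt32.toNat_inj.mp h)
theorem chLe_iff (a b : Char) : (a ≤ b) ↔ a.toNat ≤ b.toNat := by
  rw [Char.le_def, UInt32.le_iff_toNat_le]; exact Iff.rfl
theorem chOfNat_toNat {n : Nat} (h : n < 55296) : (Char.ofNat n).toNat = n := by
  rw [Char.toNat_ofNat]; simp [Nat.isValidChar]; omega
theorem isupper_iff (c : Char) : PySem.Chars.isupper c = true ↔ 65 ≤ c.toNat ∧ c.toNat ≤ 90 := by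
  unfold PySem.Chars.isupper
  rw [Bool.and_eq_true, decide_eq_true_iff, decide_eq_true_iff, chLe_iff, chLe_iff]
  exact Iff.rfl
theorem islower_iff (c : Char) : PySem.Chars.islower c = true ↔ 97 ≤ c.toNat ∧ c.toNat ≤ 122 := by
  unfold PySem.Chars.islower
  rw [Bool.and_eq_true, decide_eq_true_iff, decide_eq_true_iff, chLe_iff, chLe_iff]
  exact Iff.rfl
theorem lowerChar_toNat (c : Char) :
    (PySem.Chars.lowerChar c).toNat =
      if 65 ≤ c.toNat ∧ c.toNat ≤ 90 then c.toNat + 32 else c.toNat := by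
  unfold PySem.Chars.lowerChar
  by_cases h : PySem.Chars.isupper c = true
  · have hc := (isupper_iff c).mp h
    rw [if_pos h, if_pos hc]
    exact chOfNat_toNat (by omega)
  · rw [if_neg h, if_neg (fun hc => h ((isupper_iff c).mpr hc))]
theorem upperChar_toNat (c : Char) :
    (PySem.Chars.upperChar c).toNat =
      if 97 ≤ c.toNat ∧ c.toNat ≤ 122 then c.toNat - 32 else c.toNat := by
  unfold PySem.Chars.upperChar
  by_cases h : PySem.Chars.islower c = true
  · have hc := (islower_iff c).mp h
    rw [if_pos h, if_pos hc]
    exact chOfNat_toNat (by omega)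
  · rw [if_neg h, if_neg (fun hc => h ((islower_iff c).mpr hc))]
theorem isalpha_eq (c : Char) :
    PySem.Chars.isalpha c =
      (decide (65 ≤ c.toNat ∧ c.toNat ≤ 90) || decide (97 ≤ c.toNat ∧ c.toNat ≤ 122)) := by
  apply Bool.eq_iff_iff.mpr
  unfold PySem.Chars.isalpha
  simp only [Bool.or_eq_true, decide_eq_true_iff, isupper_iff, islower_iff]
theorem lowerChar_lowerChar (c : Char) :
    PySem.Chars.lowerChar (PySem.Chars.lowerChar c) = PySem.Chars.lowerChar c := by
  apply chNat_inj
  simp only [lowerChar_toNat]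
  split_ifs <;> omega
theorem lowerChar_upperChar (c : Char) :
    PySem.Chars.lowerChar (PySem.Chars.upperChar c) = PySem.Chars.lowerChar c := by
  apply chNat_inj
  simp only [lowerChar_toNat, upperChar_toNat]
  split_ifs <;> omega
theorem upperChar_lowerChar (c : Char) :
    PySem.Chars.upperChar (PySem.Chars.lowerChar c) = PySem.Chars.upperChar c := by
  apply chNat_inj
  simp only [lowerChar_toNat, upperChar_toNat]
  split_ifs <;> omega
theorem isalpha_lowerChar (c : Char) :
    PySem.Chars.isalpha (PySem.Chars.lowerChar c) = PySem.Chars.isalpha c := by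
  apply Bool.eq_iff_iff.mpr
  simp only [isalpha_eq, Bool.or_eq_true, decide_eq_true_iff, lowerChar_toNat]
  split_ifs <;> omega
theorem lowerChar_of_not_alpha {c : Char} (h : PySem.Chars.isalpha c = false) :
    PySem.Chars.lowerChar c = c := by
  unfold PySem.Chars.isalpha at h
  rw [Bool.or_eq_false_iff] at h
  unfold PySem.Chars.lowerChar
  rw [if_neg (by simp [h.1])]

theorem lower_lower (s : List Char) :
    PySem.Chars.lower (PySem.Chars.lower s) = PySem.Chars.lower s := by
  unfold PySem.Chars.lower
  rw [List.map_map]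
  exact List.map_congr_left (fun c _ => lowerChar_lowerChar c)

theorem length_pyTitle (b : Bool) (s : List Char) : (pyTitle b s).length = s.length := by
  induction s generalizing b with
  | nil => rfl
  | cons c cs ih => simp [pyTitle, ih]

theorem lower_pyTitle (b : Bool) (s : List Char) :
    PySem.Chars.lower (pyTitle b s) = PySem.Chars.lower s := by
  induction s generalizing b with
  | nil => rfl
  | cons c cs ih =>
    show PySem.Chars.lower (_ :: pyTitle _ cs) = _
    unfold PySem.Chars.lower at *
    simp only [List.map_cons]
    refine congrArg₂ _ ?_ (ih _)
    by_cases ha : PySem.Chars.isalpha c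
    · by_cases hb : b <;> simp [ha, hb, lowerChar_lowerChar, lowerChar_upperChar]
    · simp [ha]

theorem pyTitle_lower (b : Bool) (s : List Char) :
    pyTitle b (PySem.Chars.lower s) = pyTitle b s := by
  induction s generalizing b with
  | nil => rfl
  | cons c cs ih =>
    show pyTitle b (PySem.Chars.lowerChar c :: PySem.Chars.lower cs) = _
    simp only [pyTitle, isalpha_lowerChar]
    refine congrArg₂ _ ?_ (ih _)
    by_cases ha : PySem.Chars.isalpha c
    · by_cases hb : b <;> simp [ha, hb, lowerChar_lowerChar, upperChar_lowerChar]
    · simp only [ha]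
      exact lowerChar_of_not_alpha (by revert ha; cases PySem.Chars.isalpha c <;> simp)

theorem pyTitle_pyTitle (b : Bool) (s : List Char) :
    pyTitle b (pyTitle b s) = pyTitle b s := by
  rw [← pyTitle_lower b (pyTitle b s), lower_pyTitle, pyTitle_lower]

-- proof-side normal form of A's variant construction
def aoC (c : Char) : Bool := c == 'a' || c == 'o'

def zipSub : List Char → List Char → List Char
  | [], _ => []
  | d :: ds, cb => if aoC d then cb.headD d :: zipSub ds cb.tail else d :: zipSub ds cb

def aoPosN : List Char → List Nat
  | [] => []
  | d :: ds => if aoC d then 0 :: (aoPosN ds).map (· + 1) else (aoPosN ds).map (· + 1)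

theorem zipSub_nil (s : List Char) : zipSub s [] = s := by
  induction s with
  | nil => rfl
  | cons d ds ih => by_cases h : aoC d <;> simp [zipSub, h, ih]

theorem length_zipSub (s cb : List Char) : (zipSub s cb).length = s.length := by
  induction s generalizing cb with
  | nil => rfl
  | cons d ds ih => by_cases h : aoC d <;> simp [zipSub, h, ih]

theorem length_aoPosN (s : List Char) : (aoPosN s).length = s.countP aoC := by
  induction s with
  | nil => rfl
  | cons d ds ih =>
    by_cases h : aoC d <;> simp [aoPosN, h, ih, List.countP_cons]

theorem aoPos_aux (s : List Char) : ∀ (k : Nat),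
    ((PySem.List.enumerate s (k : Int)).filter (fun p => p.2 == 'a' || p.2 == 'o')).map (·.1)
      = (aoPosN s).map (fun n => ((n + k : Nat) : Int)) := by
  induction s with
  | nil => intro k; simp [PySem.List.enumerate_nil, aoPosN]
  | cons c cs ih =>
    intro k
    have hshift : ((k : Int) + 1) = ((k + 1 : Nat) : Int) := by push_cast; ring
    simp only [PySem.List.enumerate_cons, List.filter_cons]
    by_cases h : aoC c
    · have h' : (c == 'a' || c == 'o') = true := h
      simp only [h', if_true, List.map_cons, aoPosN, h]
      rw [hshift, ih (k + 1)]
      simp only [List.map_map]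
      refine congrArg₂ _ (by push_cast; ring) (List.map_congr_left ?_)
      intro n _; simp; push_cast; ring
    · have h' : (c == 'a' || c == 'o') = false := by simpa [aoC] using h
      simp only [h', Bool.false_eq_true, if_false, aoPosN, h]
      rw [hshift, ih (k + 1)]
      simp only [List.map_map]
      refine List.map_congr_left ?_
      intro n _; simp; push_cast; ring

theorem aoPositions_eq (s : List Char) : aoPositions s = (aoPosN s).map (Nat.cast : Nat → Int) := by
  unfold aoPositions
  have h0 := aoPos_aux s 0
  rw [Nat.cast_zero] at h0
  rw [show PySem.List.enumerate s = PySem.List.enumerate s 0 from rfl, h0]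
  exact List.map_congr_left (fun n _ => by simp)

theorem set_fold_shift (ps : List Nat) (cb : List Char) (x : Char) (t : List Char) :
    (ps.zip cb).foldl (fun l pc => l.set (pc.1 + 1) pc.2) (x :: t)
      = x :: (ps.zip cb).foldl (fun l pc => l.set pc.1 pc.2) t := by
  induction ps generalizing cb t with
  | nil => rfl
  | cons p ps ih =>
    cases cb with
    | nil => rfl
    | cons c cb => simp only [List.zip_cons_cons, List.foldl_cons, List.set_cons_succ, ih]

theorem subst_nat (s : List Char) : ∀ (cb : List Char),
    ((aoPosN s).zip cb).foldl (fun l pc => l.set pc.1 pc.2) s = zipSub s cb := by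
  induction s with
  | nil => intro cb; simp [aoPosN, zipSub]
  | cons d ds ih =>
    intro cb
    by_cases h : aoC d
    · simp only [aoPosN, h, if_true, zipSub]
      cases cb with
      | nil => simp [zipSub_nil]
      | cons c cb =>
        simp only [List.zip_cons_cons, List.foldl_cons, List.set_cons_zero, List.headD, List.tail]
        rw [List.zip_map_left, List.foldl_map]
        show ((aoPosN ds).zip cb).foldl (fun l pc => l.set (pc.1 + 1) pc.2) (c :: ds) = _
        rw [set_fold_shift, ih cb]
    · simp only [aoPosN, h, Bool.false_eq_true, if_false, zipSub]
      rw [List.zip_map_left, List.foldl_map]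
      show ((aoPosN ds).zip cb).foldl (fun l pc => l.set (pc.1 + 1) pc.2) (d :: ds) = _
      rw [set_fold_shift, ih cb]

theorem mem_prodAO {cb : List Char} {k : Nat} :
    cb ∈ prodAO k ↔ cb.length = k ∧ ∀ c ∈ cb, aoC c = true := by
  induction k generalizing cb with
  | zero =>
    simp only [prodAO, List.mem_singleton]
    constructor
    · rintro rfl; simp
    · rintro ⟨h, _⟩; exact List.eq_nil_of_length_eq_zero h
  | succ k ih =>
    simp only [prodAO, List.mem_append, List.mem_map]
    constructor
    · rintro (⟨x, hx, rfl⟩ | ⟨x, hx, rfl⟩) <;>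
        simp_all [ih, aoC] <;> omega
    · rintro ⟨hlen, hao⟩
      cases cb with
      | nil => simp at hlen
      | cons c cs =>
        have hc := hao c (by simp)
        have hcs : cs ∈ prodAO k := ih.mpr ⟨by simpa using hlen, fun c hc => hao c (by simp [hc])⟩
        rcases (by simpa [aoC] using hc : c = 'a' ∨ c = 'o') with rfl | rfl
        · exact Or.inl ⟨cs, hcs, rfl⟩
        · exact Or.inr ⟨cs, hcs, rfl⟩

theorem lexLt_asymm : ∀ {x y : List Char}, lexLt x y = true → lexLt y x = false
  | [], [], h => by simp [lexLt] at h
  | [], b :: bs, _ => by simp [lexLt]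
  | a :: as, [], h => by simp [lexLt] at h
  | a :: as, b :: bs, h => by
    simp only [lexLt] at h ⊢
    by_cases h1 : a < b
    · rw [if_neg (lt_asymm h1), if_neg (by simp; rintro rfl; exact lt_irrefl _ h1)]
    · rw [if_neg h1] at h
      by_cases h2 : a == b
      · have : a = b := by simpa using h2
        subst this
        rw [if_pos h2] at h
        rw [if_neg h1, if_pos h2]
        exact lexLt_asymm h
      · rw [if_neg h2] at h; simp at h

theorem pairwise_prodAO (k : Nat) : (prodAO k).Pairwise (fun x y => lexLt x y = true) := by
  induction k with
  | zero => simp [prodAO]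
  | succ k ih =>
    simp only [prodAO]
    rw [List.pairwise_append]
    refine ⟨?_, ?_, ?_⟩
    · rw [List.pairwise_map]
      exact ih.imp (fun h => by simpa [lexLt] using h)
    · rw [List.pairwise_map]
      exact ih.imp (fun h => by simpa [lexLt] using h)
    · intro x hx y hy
      rcases List.mem_map.mp hx with ⟨u, _, rfl⟩
      rcases List.mem_map.mp hy with ⟨v, _, rfl⟩
      simp [lexLt]

theorem aoKeyGo_eq_some : ∀ {s low cb : List Char},
    aoKeyGo s low = some cb ↔
      (zipSub low cb = s ∧ cb.length = low.countP aoC ∧ ∀ c ∈ cb, aoC c = true)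
  | [], [], cb => by
    simp only [aoKeyGo, Option.some_inj]
    constructor
    · rintro rfl; simp [zipSub]
    · rintro ⟨h, hl, _⟩
      have := length_zipSub [] cb
      cases cb with
      | nil => rfl
      | cons c cs => simp [List.countP_nil] at hl
  | [], d :: ds, cb => by
    simp only [aoKeyGo]
    constructor
    · intro h; cases h
    · rintro ⟨h, _, _⟩
      have := length_zipSub (d :: ds) cb
      rw [h] at this; simp at this
  | c :: cs, [], cb => by
    simp only [aoKeyGo]
    constructor
    · intro h; cases h
    · rintro ⟨h, _, _⟩; simp [zipSub] at h
  | c :: cs, d :: ds, cb => by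
    by_cases hd : aoC d
    · have hd' : (d == 'a' || d == 'o') = true := hd
      by_cases hc : aoC c
      · have hc' : (c == 'a' || c == 'o') = true := hc
        simp only [aoKeyGo, hd', hc', if_true, Option.map_eq_some_iff]
        constructor
        · rintro ⟨cb', hgo, rfl⟩
          rcases aoKeyGo_eq_some.mp hgo with ⟨hz, hl, hao⟩
          refine ⟨by simp [zipSub, hd, hz], by simp [List.countP_cons, hd, hl], ?_⟩
          intro e he
          rcases List.mem_cons.mp he with rfl | he
          · exact hc
          · exact hao e he
        · rintro ⟨hz, hl, hao⟩
          cases cb with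
          | nil =>
            exfalso
            simp [List.countP_cons, hd] at hl
          | cons e cb' =>
            simp only [zipSub, hd, if_true, List.headD, List.tail] at hz
            rcases List.cons.injEq .. ▸ hz with ⟨rfl, hz'⟩
            refine ⟨cb', ?_, rfl⟩
            exact aoKeyGo_eq_some.mpr ⟨hz', by simpa [List.countP_cons, hd] using hl,
              fun x hx => hao x (by simp [hx])⟩
      · have hc' : (c == 'a' || c == 'o') = false := by simpa [aoC] using hc
        simp only [aoKeyGo, hd', hc', if_true, Bool.false_eq_true, if_false]
        constructor
        · intro h; cases h
        · rintro ⟨hz, hl, hao⟩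
          exfalso
          cases cb with
          | nil => simp [List.countP_cons, hd] at hl
          | cons e cb' =>
            simp only [zipSub, hd, if_true, List.headD] at hz
            have : e = c := (List.cons.injEq .. ▸ hz).1
            exact absurd (this ▸ hao e (by simp)) (by simpa [aoC] using hc)
    · have hd' : (d == 'a' || d == 'o') = false := by simpa [aoC] using hd
      by_cases hcd : c == d
      · have hcd' : c = d := by simpa using hcd
        simp only [aoKeyGo, hd', Bool.false_eq_true, if_false, hcd, if_true]
        constructor
        · intro h
          rcases aoKeyGo_eq_some.mp h with ⟨hz, hl, hao⟩
          exact ⟨by simp [zipSub, hd, hz, hcd'], by simpa [List.countP_cons, hd] using hl, hao⟩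
        · rintro ⟨hz, hl, hao⟩
          simp only [zipSub, hd, Bool.false_eq_true, if_false] at hz
          have hz' := (List.cons.injEq .. ▸ hz).2
          exact aoKeyGo_eq_some.mpr ⟨hz', by simpa [List.countP_cons, hd] using hl, hao⟩
      · simp only [aoKeyGo, hd', Bool.false_eq_true, if_false, hcd]
        constructor
        · intro h; cases h
        · rintro ⟨hz, _, _⟩
          simp only [zipSub, hd, Bool.false_eq_true, if_false] at hz
          exact absurd ((List.cons.injEq .. ▸ hz).1 ▸ hcd) (by simp)

theorem find?_congr' {α : Type} {p q : α → Bool} {l : List α} (h : ∀ x ∈ l, p x = q x) :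
    l.find? p = l.find? q := by
  induction l with
  | nil => rfl
  | cons x t ih =>
    rw [List.find?_cons, List.find?_cons, h x (by simp)]
    cases q x
    · exact ih (fun y hy => h y (by simp [hy]))
    · rfl

theorem find?_beq_self {l : List (List Char)} {k : List Char} (h : k ∈ l) :
    l.find? (fun x => x == k) = some k := by
  induction l with
  | nil => simp at h
  | cons x t ih =>
    rw [List.find?_cons]
    by_cases hx : x = k
    · subst hx; simp
    · have hne : (x == k) = false := by simpa using hx
      rw [hne]
      have hkt : k ∈ t := by
        rcases List.mem_cons.mp h with h' | h'
        · exact absurd h'.symm hx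
        · exact h'
      exact ih hkt

theorem find?_drop_ge {l : List (List Char)}
    (hp : l.Pairwise (fun x y => lexLt x y = true)) {a b : List Char}
    (ha : a ∈ l) (hb : b ∈ l) (hab : lexLt a b = false) (q : List Char → Bool) :
    l.find? (fun x => q x || x == a || x == b) = l.find? (fun x => q x || x == b) := by
  induction l with
  | nil => rfl
  | cons h t ih =>
    rcases List.pairwise_cons.mp hp with ⟨hh, ht⟩
    rw [List.find?_cons, List.find?_cons]
    by_cases hq : q h = true
    · simp [hq]
    · have hq' : q h = false := eq_false_of_ne_true hq
      by_cases hbh : h = b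
      · subst hbh
        simp [hq']
      · by_cases hah : h = a
        · subst hah
          have hbt : b ∈ t := by
            rcases List.mem_cons.mp hb with h' | h'
            · exact absurd h'.symm hbh
            · exact h'
          exact absurd (hh b hbt) (by simp [hab])
        · have hqa : (h == a) = false := by simpa using hah
          have hqb : (h == b) = false := by simpa using hbh
          rw [hq', hqa, hqb]
          simp only [Bool.or_false]
          have hat : a ∈ t := by
            rcases List.mem_cons.mp ha with h' | h'
            · exact absurd h'.symm hah
            · exact h'
          have hbt : b ∈ t := by
            rcases List.mem_cons.mp hb with h' | h'
            · exact absurd h'.symm hbh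
            · exact h'
          exact ih ht hat hbt

theorem subst_bridge (ps : List Nat) (cb : List Char) (t : List Char) :
    ((ps.map (Nat.cast : Nat → Int)).zip cb).foldl (fun l pc => PySem.List.pySetD l pc.1 pc.2) t
      = (ps.zip cb).foldl (fun l pc => l.set pc.1 pc.2) t := by
  rw [List.zip_map_left, List.foldl_map]
  apply PySem.List.foldl_congr_mem
  intro acc x _
  simp [PySem.List.pySetD_natCast]

theorem generate_eq (name : List Char) :
    generate_ao_variants name =
      (prodAO ((PySem.Chars.lower name).countP aoC)).map
        (fun cb => pyTitle false (zipSub (PySem.Chars.lower name) cb)) := by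
  simp only [generate_ao_variants, aoPositions_eq, List.length_map, length_aoPosN]
  refine List.map_congr_left ?_
  intro cb _
  rw [subst_bridge, subst_nat]

theorem lower_zipSub_self {low cb : List Char} (hlow : PySem.Chars.lower low = low)
    (hcb : ∀ c ∈ cb, aoC c = true) :
    PySem.Chars.lower (zipSub low cb) = zipSub low cb := by
  unfold PySem.Chars.lower at hlow ⊢
  induction low generalizing cb with
  | nil => rfl
  | cons d ds ih =>
    simp only [List.map_cons, List.cons.injEq] at hlow
    by_cases h : aoC d
    · cases cb with
      | nil =>
        simp only [zipSub, h, if_true, List.headD, List.tail, zipSub_nil, List.map_cons]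
        exact congrArg₂ _ hlow.1 hlow.2
      | cons c cb' =>
        have hc : PySem.Chars.lowerChar c = c := by
          have hcc := hcb c (by simp)
          rcases (by simpa [aoC] using hcc : c = 'a' ∨ c = 'o') with rfl | rfl <;> decide
        simp only [zipSub, h, if_true, List.headD, List.tail, List.map_cons]
        exact congrArg₂ _ hc (ih hlow.2 (fun x hx => hcb x (List.mem_cons_of_mem _ hx)))
    · simp only [zipSub, h, Bool.false_eq_true, if_false, List.map_cons]
      exact congrArg₂ _ hlow.1 (ih hlow.2 hcb)

theorem aoKey_eq_some {n low cb : List Char} (hlow : PySem.Chars.lower low = low) :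
    aoKey n low = some cb ↔
      (cb.length = low.countP aoC ∧ (∀ c ∈ cb, aoC c = true) ∧
       n = pyTitle false (zipSub low cb)) := by
  unfold aoKey
  by_cases hcond : n.length ≠ low.length ∨ n ≠ pyTitle false n
  · rw [if_pos hcond]
    constructor
    · intro h; cases h
    · rintro ⟨hl, hao, hn⟩
      exfalso
      rcases hcond with hc | hc
      · exact hc (by rw [hn, length_pyTitle, length_zipSub])
      · refine hc ?_
        conv_lhs => rw [hn]
        rw [hn, pyTitle_pyTitle]
  · rw [if_neg hcond]
    push_neg at hcond
    constructor
    · intro h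
      rcases aoKeyGo_eq_some.mp h with ⟨hz, hl, hao⟩
      refine ⟨hl, hao, ?_⟩
      rw [hz, pyTitle_lower]
      exact hcond.2
    · rintro ⟨hl, hao, hn⟩
      apply aoKeyGo_eq_some.mpr
      refine ⟨?_, hl, hao⟩
      rw [hn, lower_pyTitle, lower_zipSub_self hlow hao]

def scanStep (low : List Char) :
    (Option (List Char) × Option String) → String → (Option (List Char) × Option String) :=
  fun acc n =>
    match aoKey n.toList low, acc.1 with
    | none, _ => acc
    | some k, none => (some k, some n)
    | some k, some bk => if lexLt k bk then (some k, some n) else acc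

def scanInv (low : List Char) (bk : Option (List Char)) (bn : Option String) : Prop :=
  bk.elim (bn = none)
    (fun k => k ∈ prodAO (low.countP aoC) ∧
      bn = some (String.ofList (pyTitle false (zipSub low k))))

theorem beq_some_flip (k cb : List Char) : ((some k == some cb) : Bool) = (cb == k) := by
  by_cases h : k = cb
  · subst h; simp
  · simp [h, Ne.symm h]

theorem scanB_eq (low : List Char) (hlow : PySem.Chars.lower low = low) :
    ∀ (l : List String) (bk : Option (List Char)) (bn : Option String),
      scanInv low bk bn →
      (l.foldl (scanStep low) (bk, bn)).2
        = ((prodAO (low.countP aoC)).find?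
            (fun cb => l.any (fun n => aoKey n.toList low == some cb) || bk == some cb)).map
            (fun cb => String.ofList (pyTitle false (zipSub low cb))) := by
  intro l
  induction l with
  | nil =>
    intro bk bn hinv
    cases bk with
    | none =>
      simp only [List.foldl_nil]
      rw [show ((prodAO (low.countP aoC)).find?
            (fun cb => ([] : List String).any (fun n => aoKey n.toList low == some cb)
              || (none : Option (List Char)) == some cb)) = none
          from List.find?_eq_none.mpr (fun x _ => by simp)]
      exact hinv
    | some k =>
      obtain ⟨hk, hbn⟩ := hinv
      simp only [List.foldl_nil]
      rw [find?_congr' (q := fun cb => cb == k)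
            (fun cb _ => by simp only [List.any_nil, Bool.false_or, beq_some_flip]),
        find?_beq_self hk, hbn]
      rfl
  | cons n t ih =>
    intro bk bn hinv
    rw [List.foldl_cons]
    cases hk : aoKey n.toList low with
    | none =>
      have hstep : scanStep low (bk, bn) n = (bk, bn) := by
        simp only [scanStep, hk]
      rw [hstep, ih bk bn hinv]
      refine congrArg _ (find?_congr' ?_)
      intro cb _
      simp [hk]
    | some k =>
      have hkk := (aoKey_eq_some hlow).mp hk
      have hmem : k ∈ prodAO (low.countP aoC) := mem_prodAO.mpr ⟨hkk.1, hkk.2.1⟩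
      have hns : n = String.ofList (pyTitle false (zipSub low k)) := by
        have h2 := congrArg String.ofList hkk.2.2
        rwa [String.ofList_toList] at h2
      cases bk with
      | none =>
        have hstep : scanStep low ((none : Option (List Char)), bn) n = (some k, some n) := by
          simp only [scanStep, hk]
        rw [hstep, ih (some k) (some n) ⟨hmem, by rw [hns]⟩]
        refine congrArg _ (find?_congr' ?_)
        intro cb _
        simp only [List.any_cons, hk, beq_some_flip,
          show ((none : Option (List Char)) == some cb) = false from rfl, Bool.or_false]
        simp [Bool.or_comm, Bool.or_assoc, Bool.or_left_comm]
      | some b0 =>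
        obtain ⟨hb0, hbn⟩ := hinv
        by_cases hlt : lexLt k b0 = true
        · have hstep : scanStep low (some b0, bn) n = (some k, some n) := by
            simp only [scanStep, hk, hlt, if_true]
          rw [hstep, ih (some k) (some n) ⟨hmem, by rw [hns]⟩]
          refine congrArg _ ?_
          have h1 : ((prodAO (low.countP aoC)).find?
                (fun cb => t.any (fun n => aoKey n.toList low == some cb) || some k == some cb))
              = ((prodAO (low.countP aoC)).find?
                (fun cb => t.any (fun n => aoKey n.toList low == some cb) || cb == k)) :=
            find?_congr' (fun cb _ => by rw [beq_some_flip])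
          have h2 := find?_drop_ge (pairwise_prodAO (low.countP aoC)) hb0 hmem
            (lexLt_asymm hlt) (fun cb => t.any (fun n => aoKey n.toList low == some cb))
          have h3 : ((prodAO (low.countP aoC)).find?
                (fun cb => (n :: t).any (fun n => aoKey n.toList low == some cb) || some b0 == some cb))
              = ((prodAO (low.countP aoC)).find?
                (fun cb => t.any (fun n => aoKey n.toList low == some cb) || cb == b0 || cb == k)) :=
            find?_congr' (fun cb _ => by
              simp only [List.any_cons, hk, beq_some_flip]
              simp [Bool.or_comm, Bool.or_assoc, Bool.or_left_comm])
          exact h1.trans (h2.symm.trans h3.symm)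
        · have hlt' : lexLt k b0 = false := eq_false_of_ne_true hlt
          have hstep : scanStep low (some b0, bn) n = (some b0, bn) := by
            simp only [scanStep, hk, hlt', Bool.false_eq_true, if_false]
          rw [hstep, ih (some b0) bn ⟨hb0, hbn⟩]
          refine congrArg _ ?_
          have h1 : ((prodAO (low.countP aoC)).find?
                (fun cb => t.any (fun n => aoKey n.toList low == some cb) || some b0 == some cb))
              = ((prodAO (low.countP aoC)).find?
                (fun cb => t.any (fun n => aoKey n.toList low == some cb) || cb == b0)) :=
            find?_congr' (fun cb _ => by rw [beq_some_flip])
          have h2 := find?_drop_ge (pairwise_prodAO (low.countP aoC)) hmem hb0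
            hlt' (fun cb => t.any (fun n => aoKey n.toList low == some cb))
          have h3 : ((prodAO (low.countP aoC)).find?
                (fun cb => (n :: t).any (fun n => aoKey n.toList low == some cb) || some b0 == some cb))
              = ((prodAO (low.countP aoC)).find?
                (fun cb => t.any (fun n => aoKey n.toList low == some cb) || cb == k || cb == b0)) :=
            find?_congr' (fun cb _ => by
              simp only [List.any_cons, hk, beq_some_flip]
              simp [Bool.or_comm, Bool.or_assoc, Bool.or_left_comm])
          exact h1.trans (h2.symm.trans h3.symm)

def minStep {α : Type} (key : α → Int) : Option α → α → Option α
  | none, x => some x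
  | some w, x => if key x < key w then some x else some w

theorem min?_eq_foldl {α : Type} (key : α → Int) (xs : List α) :
    PySem.List.min? xs key = xs.foldl (minStep key) none := by
  unfold PySem.List.min?
  apply PySem.List.foldl_congr_mem
  intro acc x _
  cases acc <;> rfl

theorem min?_foldl_some {α : Type} (key : α → Int) :
    ∀ (t : List α) (m : α),
      t.foldl (minStep key) (some m)
        = some ((PySem.List.min? t key).elim m (fun m' => if key m' < key m then m' else m)) := by
  intro t
  induction t with
  | nil => intro m; rfl
  | cons x xs ih =>
    intro m
    have hstep : minStep key (some m) x = some (if key x < key m then x else m) := by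
      show (if key x < key m then some x else some m) = _
      split_ifs <;> rfl
    have hcons : PySem.List.min? (x :: xs) key
        = some ((PySem.List.min? xs key).elim x (fun m' => if key m' < key x then m' else x)) := by
      rw [min?_eq_foldl, List.foldl_cons, show minStep key none x = some x from rfl]
      exact ih x
    rw [List.foldl_cons, hstep, ih, hcons]
    cases PySem.List.min? xs key <;> simp only [Option.elim] <;> (try split_ifs) <;>
      first | rfl | omega

theorem fallback_fold_eq (f : String → Int) :
    ∀ (l : List String) (bd : Int) (bm : Option String),
      l.foldl (fun acc n => if f n < acc.1 then (f n, some n) else acc) (bd, bm)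
        = (PySem.List.min? l f).elim (bd, bm)
            (fun m => if f m < bd then (f m, some m) else (bd, bm)) := by
  intro l
  induction l with
  | nil => intro bd bm; rfl
  | cons n t ih =>
    intro bd bm
    have hcons : PySem.List.min? (n :: t) f
        = some ((PySem.List.min? t f).elim n (fun m' => if f m' < f n then m' else n)) := by
      rw [min?_eq_foldl, List.foldl_cons, show minStep f none n = some n from rfl]
      exact min?_foldl_some f t n
    rw [List.foldl_cons, hcons]
    show t.foldl _ (if f n < bd then (f n, some n) else (bd, bm)) = _
    by_cases h1 : f n < bd
    · rw [if_pos h1, ih]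
      cases PySem.List.min? t f <;> simp only [Option.elim] <;> (try split_ifs) <;>
        first | rfl | omega
    · rw [if_neg h1, ih]
      cases PySem.List.min? t f <;> simp only [Option.elim] <;> (try split_ifs) <;>
        first | rfl | omega

-- ===== VERDICT (by name: the statement is the Claim_ definition above) =====
theorem contains_eq_any_key {known : List String} {low : List Char}
    (hlow : PySem.Chars.lower low = low) {cb : List Char}
    (hlen : cb.length = low.countP aoC) (hao : ∀ c ∈ cb, aoC c = true) :
    known.contains (String.ofList (pyTitle false (zipSub low cb)))
      = known.any (fun n => aoKey n.toList low == some cb) := by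
  rw [← List.any_beq']
  apply PySem.List.any_congr_mem
  intro n _
  apply Bool.eq_iff_iff.mpr
  simp only [beq_iff_eq]
  constructor
  · intro h
    exact (aoKey_eq_some hlow).mpr ⟨hlen, hao, by rw [h, String.toList_ofList]⟩
  · intro h
    have h2 := ((aoKey_eq_some hlow).mp h).2.2
    have h3 := congrArg String.ofList h2
    rwa [String.ofList_toList] at h3

theorem correct_name_spec : Claim_equal_correct_name := by
  unfold Claim_equal_correct_name
  intro raw known md _
  unfold Spec_correct_name
  show correct_name raw known md = correct_name_alt raw known md
  simp only [correct_name, correct_name_alt]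
  have hlow : PySem.Chars.lower (PySem.Chars.lower (pyTitle false raw.toList))
      = PySem.Chars.lower (pyTitle false raw.toList) := lower_lower _
  -- normalize A's variant search
  rw [generate_eq, List.find?_map]
  rw [find?_congr' (q := fun cb =>
        known.any (fun n =>
          aoKey n.toList (PySem.Chars.lower (pyTitle false raw.toList)) == some cb)
          || (none : Option (List Char)) == some cb)
      (fun cb hcb => by
        obtain ⟨hlen, hao⟩ := mem_prodAO.mp hcb
        simp only [Function.comp_apply,
          show ((none : Option (List Char)) == some cb) = false from rfl, Bool.or_false]
        exact contains_eq_any_key hlow hlen hao)]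
  -- normalize B's scan
  have hfold : known.foldl (fun acc n =>
        match aoKey n.toList (PySem.Chars.lower (pyTitle false raw.toList)) with
        | none => acc
        | some k =>
          match acc.1 with
          | none => (some k, some n)
          | some bk => if lexLt k bk then (some k, some n) else acc)
      ((none : Option (List Char)), (none : Option String))
      = known.foldl (scanStep (PySem.Chars.lower (pyTitle false raw.toList)))
          ((none : Option (List Char)), (none : Option String)) := by
    apply PySem.List.foldl_congr_mem
    intro acc n _
    obtain ⟨a1, a2⟩ := acc
    cases hA : aoKey n.toList (PySem.Chars.lower (pyTitle false raw.toList)) with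
    | none => cases a1 <;> simp only [scanStep, hA]
    | some k => cases a1 <;> simp only [scanStep, hA]
  rw [hfold, scanB_eq _ hlow known none none rfl]
  -- case on the common variant search
  cases hf : (prodAO ((PySem.Chars.lower (pyTitle false raw.toList)).countP aoC)).find?
      (fun cb => known.any (fun n =>
          aoKey n.toList (PySem.Chars.lower (pyTitle false raw.toList)) == some cb)
        || (none : Option (List Char)) == some cb) with
  | some cb => simp only [Option.map_some]
  | none =>
    simp only [Option.map_none]
    -- fallback: A's sentinel scan vs B's min(key=...)
    rw [fallback_fold_eq (fun n =>
        levenshtein (PySem.Chars.lower (pyTitle false raw.toList))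
          (PySem.Chars.lower n.toList)) known (md + 1) none]
    cases hm : PySem.List.min? known (fun n =>
        levenshtein (PySem.Chars.lower (pyTitle false raw.toList))
          (PySem.Chars.lower n.toList)) with
    | none =>
      simp only [Option.elim]
      have h2 : ¬ ((md : Int) + 1 ≤ md) := by omega
      simp [h2]
    | some m =>
      simp only [Option.elim]
      by_cases hle : levenshtein (PySem.Chars.lower (pyTitle false raw.toList))
          (PySem.Chars.lower m.toList) ≤ md
      · rw [if_pos (show levenshtein (PySem.Chars.lower (pyTitle false raw.toList))
            (PySem.Chars.lower m.toList) < md + 1 by omega)]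
        simp [hle]
      · rw [if_neg (show ¬ levenshtein (PySem.Chars.lower (pyTitle false raw.toList))
            (PySem.Chars.lower m.toList) < md + 1 by omega)]
        have h2 : ¬ ((md : Int) + 1 ≤ md) := by omega
        simp [hle, h2]
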